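-- pv_equiv track=rewrite | github.com/lina2360/HiSeqGan | programs/data_processing/save_cluster_with_clustered_label_sequence.py | get_map_pos
-- ===== SOURCE A (Python) =====
-- def get_map_pos(text_file):
--     cluster_pos_X_index = [i for i, x in enumerate(text_file) if x == "$POS_X"]
--     cluster_pos_Y_index = [i for i, x in enumerate(text_file) if x == "$POS_Y"]
--
--     pos_X = []
--     for i in cluster_pos_X_index:
--         pos_X.append(text_file[i+1])
--
--     pos_Y = []
--     for i in cluster_pos_Y_index:
--         pos_Y.append(text_file[i+1])
--
--     # create column name (as key)
--     column_name = []
--     for i in range(len(pos_X)):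
--         name = pos_X[i] + '_' + pos_Y[i]
--         column_name.append(name)
--
--     column_position_dict = {'grouop_position': column_name}
--
--     return column_position_dict
-- ===== SOURCE B (Python) =====
-- def get_map_pos(text_file):
--     # One pass over the file; zip pairs the collected values.
--     pos_X, pos_Y = [], []
--     for i, x in enumerate(text_file):
--         if x == "$POS_X":
--             pos_X.append(text_file[i + 1])
--         elif x == "$POS_Y":
--             pos_Y.append(text_file[i + 1])
--     column_name = [x + '_' + y for x, y in zip(pos_X, pos_Y)]
--     return {'grouop_position': column_name}
-- ===== Notes on version B (the rewrite author's own statement) =====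
-- stated objective: simpler
-- what changed: Replaces A's four passes (two enumerate-filter index scans, two index-driven append loops, then an index loop pairing by position) with one pass over enumerate collecting both value lists directly, paired by zip.
import Mathlib
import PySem

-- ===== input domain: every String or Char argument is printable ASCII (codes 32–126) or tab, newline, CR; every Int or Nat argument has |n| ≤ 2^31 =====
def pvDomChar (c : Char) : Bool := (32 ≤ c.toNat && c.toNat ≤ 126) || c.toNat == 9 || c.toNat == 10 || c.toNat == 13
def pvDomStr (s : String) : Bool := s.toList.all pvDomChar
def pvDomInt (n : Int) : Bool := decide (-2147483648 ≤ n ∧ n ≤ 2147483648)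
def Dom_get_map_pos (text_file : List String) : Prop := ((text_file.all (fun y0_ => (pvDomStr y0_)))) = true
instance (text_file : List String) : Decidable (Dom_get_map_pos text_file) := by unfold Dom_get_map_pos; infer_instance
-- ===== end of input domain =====

-- B replaces A's four passes (two enumerate-filter scans, two index loops, a pairing index loop)
-- with one pass over enumerate collecting both value lists, paired by zip: simpler, same cost.


-- Python str '+', exact, kernel-transparent (shared helper of both ports)
def strAdd (a b : String) : String := String.ofList (a.toList ++ b.toList)

-- ===== PORT A =====
def get_map_pos (text_file : List String) : List (String × List String) :=
  let cluster_pos_X_index :=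
    ((PySem.List.enumerate text_file 0).filter (fun p => p.2 == "$POS_X")).map (fun p => p.1)
  let cluster_pos_Y_index :=
    ((PySem.List.enumerate text_file 0).filter (fun p => p.2 == "$POS_Y")).map (fun p => p.1)
  -- text_file[i+1]: pyGetD, in range under Pre_ (no marker is the last element)
  let pos_X := cluster_pos_X_index.foldl
    (fun acc i => acc ++ [PySem.List.pyGetD text_file (i + 1) ""]) []
  let pos_Y := cluster_pos_Y_index.foldl
    (fun acc i => acc ++ [PySem.List.pyGetD text_file (i + 1) ""]) []
  -- for i in range(len(pos_X)): pos_X[i] + '_' + pos_Y[i]; pos_Y[i] in range under Pre_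
  let column_name := (PySem.List.pyRange 0 (pos_X.length : Int) 1).foldl
    (fun acc i => acc ++ [strAdd (strAdd (PySem.List.pyGetD pos_X i "") "_")
                                 (PySem.List.pyGetD pos_Y i "")]) []
  [("grouop_position", column_name)]

-- ===== PORT B =====
def get_map_pos_alt (text_file : List String) : List (String × List String) :=
  let p := (PySem.List.enumerate text_file 0).foldl
    (fun (acc : List String × List String) ix =>
      if ix.2 == "$POS_X" then (acc.1 ++ [PySem.List.pyGetD text_file (ix.1 + 1) ""], acc.2)
      else if ix.2 == "$POS_Y" then (acc.1, acc.2 ++ [PySem.List.pyGetD text_file (ix.1 + 1) ""])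
      else acc) ([], [])
  let column_name := List.zipWith (fun x y => strAdd (strAdd x "_") y) p.1 p.2
  [("grouop_position", column_name)]

-- ===== PRECONDITION & SPEC =====
-- Pre_ excludes exactly the inputs on which A raises IndexError: a marker ('$POS_X'/'$POS_Y')
-- as the last element (text_file[i+1] out of range), or more '$POS_X' than '$POS_Y' markers
-- (pos_Y[i] out of range in the pairing loop).
def Pre_get_map_pos (text_file : List String) : Prop :=
  text_file.getLast? ≠ some "$POS_X" ∧ text_file.getLast? ≠ some "$POS_Y" ∧
  text_file.count "$POS_X" ≤ text_file.count "$POS_Y"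
instance (text_file : List String) : Decidable (Pre_get_map_pos text_file) := by
  unfold Pre_get_map_pos; infer_instance
def pvWitness_get_map_pos : List String := ["$POS_X", "12", "$POS_Y", "34", "end"]

def Spec_get_map_pos (text_file : List String) (out : List (String × List String)) : Prop :=
  out = get_map_pos_alt text_file
instance (text_file : List String) (out : List (String × List String)) :
    Decidable (Spec_get_map_pos text_file out) := by unfold Spec_get_map_pos; infer_instance

-- ===== CLAIM (what is proved, stated in full; the proofs are below) =====
def Claim_equal_get_map_pos : Prop := ∀ (text_file : List String),
  Dom_get_map_pos text_file → Pre_get_map_pos text_file →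
  Spec_get_map_pos text_file (get_map_pos text_file)

-- ===== LEMMAS AND PROOFS =====

-- B's single fold over enumerate = the two filtered maps A builds, one per marker.
lemma pairFold (f : Int × String → String) (l : List (Int × String)) :
    ∀ (aX aY : List String),
    l.foldl (fun (acc : List String × List String) ix =>
      if ix.2 == "$POS_X" then (acc.1 ++ [f ix], acc.2)
      else if ix.2 == "$POS_Y" then (acc.1, acc.2 ++ [f ix])
      else acc) (aX, aY)
    = (aX ++ (l.filter (fun p => p.2 == "$POS_X")).map f,
       aY ++ (l.filter (fun p => p.2 == "$POS_Y")).map f) := by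
  induction l with
  | nil => intro aX aY; simp
  | cons e t ih =>
      intro aX aY
      rw [List.foldl_cons]
      by_cases hX : e.2 = "$POS_X"
      · have hc : (if (e.2 == "$POS_X") = true then ((aX, aY).1 ++ [f e], (aX, aY).2)
            else if (e.2 == "$POS_Y") = true then ((aX, aY).1, (aX, aY).2 ++ [f e])
            else (aX, aY)) = (aX ++ [f e], aY) := by simp [hX]
        rw [hc, ih]
        simp [hX]
      · by_cases hY : e.2 = "$POS_Y"
        · have hc : (if (e.2 == "$POS_X") = true then ((aX, aY).1 ++ [f e], (aX, aY).2)
              else if (e.2 == "$POS_Y") = true then ((aX, aY).1, (aX, aY).2 ++ [f e])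
              else (aX, aY)) = (aX, aY ++ [f e]) := by simp [hY]
          rw [hc, ih]
          simp [hY]
        · have hc : (if (e.2 == "$POS_X") = true then ((aX, aY).1 ++ [f e], (aX, aY).2)
              else if (e.2 == "$POS_Y") = true then ((aX, aY).1, (aX, aY).2 ++ [f e])
              else (aX, aY)) = (aX, aY) := by simp [hX, hY]
          rw [hc, ih]
          simp [hX, hY]

-- A's pairing loop over range(len(xs)), read as a map, = zipWith when ys is long enough.
lemma mapRangeZip (xs ys : List String)
    (hle : xs.length ≤ ys.length) :
    (PySem.List.pyRange 0 (xs.length : Int) 1).map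
      (fun i => strAdd (strAdd (PySem.List.pyGetD xs i "") "_") (PySem.List.pyGetD ys i "")) =
    List.zipWith (fun x y => strAdd (strAdd x "_") y) xs ys := by
  rw [PySem.List.pyRange_one]
  simp only [List.map_map]
  apply List.ext_getElem
  · simp; omega
  · intro i hi1 hi2
    simp only [List.getElem_map, List.getElem_range, Function.comp_apply, zero_add,
      List.getElem_zipWith, PySem.List.pyGetD_natCast]
    have hx : i < xs.length := by simp at hi1; omega
    have hy : i < ys.length := lt_of_lt_of_le hx hle
    rw [List.getD_eq_getElem _ _ hx, List.getD_eq_getElem _ _ hy]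

-- counting a marker through enumerate
lemma countP_enum (xs : List String) (m : String) :
    ∀ (s : Int), ((PySem.List.enumerate xs s).filter (fun p => p.2 == m)).length
      = xs.count m := by
  induction xs with
  | nil => intro s; simp [PySem.List.enumerate_nil]
  | cons x t ih =>
      intro s
      by_cases hx : x = m <;> simp [PySem.List.enumerate_cons, hx, ih]

-- ===== VERDICT (by name: the statement is the Claim_ definition above) =====
theorem get_map_pos_spec : Claim_equal_get_map_pos := by
  intro tf _hdom hpre
  obtain ⟨_, _, hcnt⟩ := hpre
  unfold Spec_get_map_pos
  simp only [get_map_pos, get_map_pos_alt]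
  rw [pairFold]
  simp only [List.nil_append, PySem.List.foldl_append_singleton_eq_map, List.map_map]
  rw [mapRangeZip]
  · simp [Function.comp_def]
  · simp only [List.length_map, countP_enum]
    exact hcnt
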